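-- pv_equiv track=rewrite | github.com/ArshErgon/Leetcode-Question-In-Python | LeetCode/stack/maximumSubarrayWithMinValue.py | maximumSubarrayWithMinValue
-- ===== SOURCE A (Python) =====
-- def maximumSubarrayWithMinValue(nums):
--     stack = [(-1, 0)]
--     ret, runningSum = 0, 0
--     nums.append(0)
--     for num in nums:
--         while stack and stack[-1][0] >= num:
--             minValue = stack.pop()[0]
--             product = minValue * (runningSum - stack[-1][1])
--             ret = max(ret, product)
--
--         runningSum += num
--         stack.append((num, runningSum))
--
--     return ret % (10**9+7)
-- ===== SOURCE B (Python) =====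
-- MOD = 10**9 + 7
--
-- def maximumSubarrayWithMinValue(nums):
--     # staged: prefix sums + boundary tables (prev strictly smaller / next smaller-or-equal),
--     # then one flat pass taking the max of nums[i] * sum(maximal window where nums[i] is min).
--     nums.append(0)  # same trailing sentinel (and same mutation of the caller's list) as A
--     n = len(nums)
--     prefix = [0]
--     for x in nums:
--         prefix.append(prefix[-1] + x)
--     left = [-1] * n
--     right = [n] * n
--     stack = []
--     for j in range(n):
--         while stack and nums[stack[-1]] >= nums[j]:
--             right[stack.pop()] = j
--         left[j] = -1 if not stack else stack[-1]
--         stack.append(j)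
--     best = 0
--     for i in range(n):
--         best = max(best, nums[i] * (prefix[right[i]] - prefix[left[i] + 1]))
--     return best % MOD
-- ===== Notes on version B (the rewrite author's own statement) =====
-- stated objective: alternative
-- what changed: B replaces A's fused single pass (products computed on the fly during stack pops with running sums carried on the stack) by a staged computation: a prefix-sum list, explicit previous-strictly-smaller/next-smaller-or-equal boundary tables built with an index stack, then a separate flat pass maximising nums[i]*(prefix[right[i]]-prefix[left[i]+1]).
import Mathlib
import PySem

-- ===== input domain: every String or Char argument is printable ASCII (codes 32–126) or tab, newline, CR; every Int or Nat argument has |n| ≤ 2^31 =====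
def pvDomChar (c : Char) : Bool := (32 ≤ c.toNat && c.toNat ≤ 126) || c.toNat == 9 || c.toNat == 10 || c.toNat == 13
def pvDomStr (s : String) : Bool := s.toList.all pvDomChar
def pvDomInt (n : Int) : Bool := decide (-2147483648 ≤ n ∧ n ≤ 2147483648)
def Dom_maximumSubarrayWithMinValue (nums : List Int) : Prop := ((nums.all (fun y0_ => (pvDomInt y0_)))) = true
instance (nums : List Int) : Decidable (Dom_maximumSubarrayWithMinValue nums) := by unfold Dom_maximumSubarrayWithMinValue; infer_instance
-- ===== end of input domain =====

-- B replaces A's fused one-pass (stack of (value, running prefix) with products computed during pops)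
-- by a staged computation: a prefix-sum list, previous-strictly-smaller / next-smaller-or-equal
-- boundary tables built with an index stack, then one flat pass maximising
-- nums[i] * (prefix[right[i]] - prefix[left[i]+1]); return values proved equal on Pre_.
-- (Both A and B append a trailing 0 to the caller's list, so the side effect is identical.)

-- ===== PORT A =====
-- A's inner while loop ('while stack and stack[-1][0] >= num'); the list head is the stack top.
-- If a pop empties the stack, Python's subsequent top access raises IndexError: that case
-- (reachable only outside Pre_) returns ([], ret) here.
def aPop (num runningSum : Int) : List (Int × Int) → Int → List (Int × Int) × Int
  | [], ret => ([], ret)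
  | (v, p) :: rest, ret =>
    if v ≥ num then
      match rest with
      | [] => ([], ret)
      | (v2, p2) :: rest2 => aPop num runningSum ((v2, p2) :: rest2) (max ret (v * (runningSum - p2)))
    else ((v, p) :: rest, ret)

def aStep (st : List (Int × Int) × Int × Int) (num : Int) : List (Int × Int) × Int × Int :=
  let r := aPop num st.2.2 st.1 st.2.1
  let runningSum' := st.2.2 + num
  ((num, runningSum') :: r.1, r.2, runningSum')

def maximumSubarrayWithMinValue (nums : List Int) : Int :=
  -- nums.append(0) then iterate: fold over nums ++ [0]
  let st := (nums ++ [0]).foldl aStep ([(-1, 0)], 0, 0)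
  PySem.Int.mod st.2.1 (10 ^ 9 + 7)

-- ===== PORT B =====
-- B's inner 'while stack and nums[stack[-1]] >= nums[j]' loop: pops indices, writing right[i] = j.
-- Indices produced by range(n) are nonnegative, so they are carried as Nat; list reads/writes are
-- all in range under Pre_ (getD/set defaults are never hit there).
def bBndPop (a : List Int) (j : Nat) : List Nat → List Nat → List Nat × List Nat
  | [], right => ([], right)
  | i :: rest, right =>
    if a.getD i 0 ≥ a.getD j 0 then bBndPop a j rest (right.set i j)
    else (i :: rest, right)

-- '-1 if not stack else stack[-1]'
def topI : List Nat → Int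
  | [] => -1
  | i :: _ => (i : Int)

def bBndStep (a : List Int) (st : List Nat × List Int × List Nat) (j : Nat) :
    List Nat × List Int × List Nat :=
  let r := bBndPop a j st.1 st.2.2
  (j :: r.1, st.2.1.set j (topI r.1), r.2)

def maximumSubarrayWithMinValue_alt (nums : List Int) : Int :=
  let a := nums ++ [0]                                  -- nums.append(0)
  let n := a.length
  let prefixs := a.foldl (fun p x => p ++ [PySem.List.pyGetD p (-1) 0 + x]) [(0 : Int)]
  let st := (List.range n).foldl (bBndStep a) ([], List.replicate n (-1 : Int), List.replicate n n)
  let best := (List.range n).foldl (fun b i =>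
    max b (a.getD i 0 *
      (prefixs.getD (st.2.2.getD i 0) 0 - prefixs.getD ((st.2.1.getD i (-1)) + 1).toNat 0))) 0
  PySem.Int.mod best (10 ^ 9 + 7)

-- ===== PRECONDITION & SPEC =====
-- A returns exactly on lists of nonnegative integers: a negative element makes A pop its
-- sentinel pair and then index the now-empty stack, raising IndexError.
def Pre_maximumSubarrayWithMinValue (nums : List Int) : Prop := ∀ x ∈ nums, 0 ≤ x
instance (nums : List Int) : Decidable (Pre_maximumSubarrayWithMinValue nums) := by
  unfold Pre_maximumSubarrayWithMinValue; infer_instance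

def pvWitness_maximumSubarrayWithMinValue : List Int := [3, 1, 2, 4]

def Spec_maximumSubarrayWithMinValue (nums : List Int) (out : Int) : Prop := out = maximumSubarrayWithMinValue_alt nums
instance (nums : List Int) (out : Int) : Decidable (Spec_maximumSubarrayWithMinValue nums out) := by unfold Spec_maximumSubarrayWithMinValue; infer_instance

-- ===== CLAIM (what is proved, stated in full; the proofs are below) =====
def Claim_equal_maximumSubarrayWithMinValue : Prop := ∀ (nums : List Int), Dom_maximumSubarrayWithMinValue nums → Pre_maximumSubarrayWithMinValue nums → Spec_maximumSubarrayWithMinValue nums (maximumSubarrayWithMinValue nums)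

-- ===== LEMMAS AND PROOFS =====

-- prefix sums as a function: sum of the first k elements
def preS (a : List Int) (k : Nat) : Int := (a.take k).sum

-- the product B's final pass assigns to index i, stated over preS
def Pf (a lt : List Int) (rt : List Nat) (i : Nat) : Int :=
  a.getD i 0 * (preS a (rt.getD i 0) - preS a ((lt.getD i (-1)) + 1).toNat)

-- A's stack entry corresponding to index i of B's stack
def enc (a : List Int) (i : Nat) : Int × Int := (a.getD i 0, preS a (i + 1))

-- the left-table is consistent with the stack: each stack index's left entry is the index below it
def chainOK (left : List Int) : List Nat → Prop
  | [] => True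
  | i :: rest => left.getD i (-1) = topI rest ∧ chainOK left rest

-- the tail-of-the-prefix-list built by B's first loop
def accFrom (s : Int) : List Int → List Int
  | [] => []
  | x :: xs => (s + x) :: accFrom (s + x) xs

theorem prefix_fold (xs : List Int) : ∀ (p : List Int) (s : Int), PySem.List.pyGetD p (-1) 0 = s →
    xs.foldl (fun p x => p ++ [PySem.List.pyGetD p (-1) 0 + x]) p = p ++ accFrom s xs := by
  induction xs with
  | nil => intro p s _; simp [accFrom]
  | cons x xs ih =>
    intro p s hs
    simp only [List.foldl_cons, hs, accFrom]
    rw [ih (p ++ [s + x]) (s + x) (PySem.List.pyGetD_neg_one_append_singleton p (s + x) 0)]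
    simp

theorem accFrom_getD (a : List Int) : ∀ (s : Int) (m : Nat), m ≤ a.length →
    (s :: accFrom s a).getD m 0 = s + preS a m := by
  induction a with
  | nil => intro s m hm; have : m = 0 := by simpa using hm
           subst this; simp [preS]
  | cons x xs ih =>
    intro s m hm
    cases m with
    | zero => simp [preS]
    | succ m =>
      simp only [accFrom, List.getD_cons_succ]
      rw [ih (s + x) m (by simpa using hm)]
      simp [preS, List.take_succ_cons]
      ring

theorem preS_succ (a : List Int) (k : Nat) (hk : k < a.length) :
    preS a (k + 1) = preS a k + a.getD k 0 := by
  unfold preS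
  rw [List.sum_take_succ a k hk]
  simp [List.getD, List.getElem?_eq_getElem hk]


-- small indexing facts used throughout (read/write of tables held as lists)
theorem setD_ne {α : Type} (l : List α) (i j : Nat) (x d : α) (h : i ≠ j) :
    (l.set i x).getD j d = l.getD j d := by
  simp [List.getD, List.getElem?_set_ne h]

theorem setD_self {α : Type} (l : List α) (i : Nat) (x d : α) (h : i < l.length) :
    (l.set i x).getD i d = x := by
  simp [List.getD, h]

theorem Pf_right_set (a lt : List Int) (rt : List Nat) (i j p : Nat) (h : p ≠ i) :
    Pf a lt (rt.set i j) p = Pf a lt rt p := by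
  unfold Pf; rw [setD_ne _ _ _ _ _ (Ne.symm h)]

theorem Pf_left_set (a lt : List Int) (rt : List Nat) (i p : Nat) (x : Int) (h : p ≠ i) :
    Pf a (lt.set i x) rt p = Pf a lt rt p := by
  unfold Pf; rw [setD_ne _ _ _ _ _ (Ne.symm h)]

theorem bBndPop_right_mem (a : List Int) (j : Nat) :
    ∀ (sB : List Nat) (right : List Nat) (x : Nat), x ∈ (bBndPop a j sB right).2 → x ∈ right ∨ x = j := by
  intro sB
  induction sB with
  | nil => intro right x hx; exact Or.inl (by simpa [bBndPop] using hx)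
  | cons i rest ih =>
    intro right x hx
    by_cases hge : a.getD i 0 ≥ a.getD j 0
    · simp only [bBndPop, if_pos hge] at hx
      rcases ih _ _ hx with h | h
      · rcases List.mem_or_eq_of_mem_set h with h2 | h2
        · exact Or.inl h2
        · exact Or.inr h2
      · exact Or.inr h
    · simp only [bBndPop, if_neg hge] at hx
      exact Or.inl hx

theorem chainOK_append (left : List Int) :
    ∀ (xs ys : List Nat), chainOK left (xs ++ ys) → chainOK left ys := by
  intro xs
  induction xs with
  | nil => intro ys h; exact h
  | cons x xs ih => intro ys h; exact ih ys h.2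

theorem chainOK_set (left : List Int) (j : Nat) (x : Int) :
    ∀ (l : List Nat), j ∉ l → chainOK left l → chainOK (left.set j x) l := by
  intro l
  induction l with
  | nil => intro _ _; trivial
  | cons i rest ih =>
    intro hj h
    refine ⟨?_, ih (fun hm => hj (List.mem_cons_of_mem _ hm)) h.2⟩
    rw [setD_ne _ _ _ _ _ (by rintro rfl; exact hj (List.mem_cons_self ..))]
    exact h.1

-- master simulation of one inner while-loop of A against one inner while-loop of B
theorem popSim (a : List Int) (hnneg : ∀ x ∈ a, 0 ≤ x) (k : Nat) (hk : k < a.length) :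
    ∀ (sB : List Nat) (right : List Nat) (popped : List Nat) (ret : Int) (left : List Int),
    (∀ i ∈ sB, i < k) → (∀ i ∈ popped, i < k) → (∀ i ∈ sB, i ∉ popped) → sB.Nodup →
    chainOK left sB → right.length = a.length →
    ret = (popped.map (Pf a left right)).foldl max 0 →
    ∃ popped' : List Nat,
      aPop (a.getD k 0) (preS a k) (sB.map (enc a) ++ [((-1 : Int), (0 : Int))]) ret
        = ((bBndPop a k sB right).1.map (enc a) ++ [((-1 : Int), (0 : Int))],
           (popped'.map (Pf a left (bBndPop a k sB right).2)).foldl max 0)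
      ∧ (bBndPop a k sB right).1 <:+ sB
      ∧ (popped' ++ (bBndPop a k sB right).1).Perm (popped ++ sB)
      ∧ (∀ i ∈ popped', i < k)
      ∧ (∀ i ∈ (bBndPop a k sB right).1, i ∉ popped')
      ∧ (bBndPop a k sB right).2.length = a.length := by
  have hnum : 0 ≤ a.getD k 0 := by
    rw [List.getD_eq_getElem a 0 hk]; exact hnneg _ (List.getElem_mem hk)
  intro sB
  induction sB with
  | nil =>
    intro right popped ret left _ hplt _ _ _ hrlen hret
    have hneg : ¬ ((-1 : Int) ≥ a.getD k 0) := by omega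
    refine ⟨popped, ?_, ?_, ?_, hplt, ?_, ?_⟩
    · simp only [List.map_nil, List.nil_append, bBndPop, aPop, if_neg hneg, hret]
    all_goals simp [bBndPop, hrlen]
  | cons i rest ih =>
    intro right popped ret left hlt hplt hdisj hnd hchain hrlen hret
    have hik : i < k := hlt i (List.mem_cons_self ..)
    by_cases hge : a.getD i 0 ≥ a.getD k 0
    · have hleft : left.getD i (-1) = topI rest := hchain.1
      have hinp : i ∉ popped := hdisj i (List.mem_cons_self ..)
      have hretEq : max ret (a.getD i 0 * (preS a k - preS a ((left.getD i (-1) + 1).toNat)))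
          = ((popped ++ [i]).map (Pf a left (right.set i k))).foldl max 0 := by
        rw [List.map_append, List.foldl_append]
        have h1 : popped.map (Pf a left (right.set i k)) = popped.map (Pf a left right) := by
          apply List.map_congr_left
          intro p hp
          exact Pf_right_set a left right i k p (fun he => hinp (he ▸ hp))
        have h2 : Pf a left (right.set i k) i
            = a.getD i 0 * (preS a k - preS a ((left.getD i (-1) + 1).toNat)) := by
          unfold Pf
          rw [setD_self _ _ _ _ (by omega)]
        rw [h1, ← hret]
        simp only [List.map_cons, List.map_nil, List.foldl_cons, List.foldl_nil, h2]
      have hrec := ih (right.set i k) (popped ++ [i])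
        (max ret (a.getD i 0 * (preS a k - preS a ((left.getD i (-1) + 1).toNat)))) left
        (fun j hj => hlt j (List.mem_cons_of_mem _ hj))
        (by intro j hj
            rcases List.mem_append.mp hj with h | h
            · exact hplt j h
            · simp at h; omega)
        (by intro j hj hj2
            rcases List.mem_append.mp hj2 with h | h
            · exact hdisj j (List.mem_cons_of_mem _ hj) h
            · simp at h; subst h; exact (List.nodup_cons.mp hnd).1 hj)
        (List.nodup_cons.mp hnd).2 hchain.2 (by simpa using hrlen) hretEq
      obtain ⟨pp, heq, hsfx, hperm, hpplt, hdisj2, hrlen2⟩ := hrec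
      refine ⟨pp, ?_, ?_, ?_, hpplt, ?_, ?_⟩
      · -- unfold one step of both loops, then use the recursive equation
        cases rest with
        | nil =>
          have hneg : ¬ ((-1 : Int) ≥ a.getD k 0) := by omega
          have hpre0 : preS a ((left.getD i (-1) + 1).toNat) = 0 := by
            rw [hleft]; simp [topI, preS]
          simp only [bBndPop, List.map_nil, List.map_cons, List.nil_append, List.cons_append,
            aPop, if_pos hge, if_neg hneg, enc] at heq ⊢
          rw [hpre0] at heq
          exact heq
        | cons i' rest' =>
          have htn : ((i' : Int) + 1).toNat = i' + 1 := by omega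
          have hpre1 : preS a ((left.getD i (-1) + 1).toNat) = preS a (i' + 1) := by
            rw [hleft]; simp [topI, htn]
          simp only [bBndPop, List.map_cons, List.cons_append, aPop, if_pos hge, enc] at heq ⊢
          rw [hpre1] at heq
          exact heq
      · simp only [bBndPop, if_pos hge]
        exact hsfx.trans (List.suffix_cons i rest)
      · simp only [bBndPop, if_pos hge]
        refine hperm.trans ?_
        simp
      · simp only [bBndPop, if_pos hge]
        exact hdisj2
      · simp only [bBndPop, if_pos hge]
        exact hrlen2
    · have hge' : ¬ (a[k]?.getD 0 ≤ a[i]?.getD 0) := by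
        simpa [List.getD_eq_getElem?_getD, ge_iff_le] using hge
      refine ⟨popped, ?_, ?_, ?_, hplt, ?_, ?_⟩ <;>
        simp [bBndPop, aPop.eq_def, hge', enc, hret, hrlen, hdisj]
      intro j hj
      exact hdisj j (List.mem_cons_of_mem _ hj)

-- the global invariant between A's fold state after k elements and B's fold state after k indices
def InvAB (a : List Int) (k : Nat) : Prop :=
  let n := a.length
  let A := (a.take k).foldl aStep ([((-1 : Int), (0 : Int))], (0 : Int), (0 : Int))
  let B := (List.range k).foldl (bBndStep a) ([], List.replicate n (-1 : Int), List.replicate n n)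
  ∃ popped : List Nat,
    A.1 = B.1.map (enc a) ++ [((-1 : Int), (0 : Int))] ∧
    A.2.2 = preS a k ∧
    A.2.1 = (popped.map (Pf a B.2.1 B.2.2)).foldl max 0 ∧
    chainOK B.2.1 B.1 ∧
    (∀ i ∈ B.1, i < k) ∧ B.1.Nodup ∧ (∀ i ∈ popped, i < k) ∧ (∀ i ∈ B.1, i ∉ popped) ∧
    (popped ++ B.1).Perm (List.range k) ∧
    B.2.1.length = a.length ∧ B.2.2.length = a.length ∧
    (∀ x ∈ B.2.1, -1 ≤ x ∧ x < (a.length : Int)) ∧ (∀ x ∈ B.2.2, x ≤ a.length)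

theorem invAB_zero (a : List Int) : InvAB a 0 := by
  refine ⟨[], ?_, ?_, ?_, ?_, ?_, ?_, ?_, ?_, ?_, ?_, ?_, ?_, ?_⟩ <;>
    simp [chainOK, preS, List.mem_replicate]
  omega

theorem invAB_step (a : List Int) (hnneg : ∀ x ∈ a, 0 ≤ x) (k : Nat) (hk : k < a.length)
    (h : InvAB a k) : InvAB a (k + 1) := by
  simp only [InvAB] at h ⊢
  obtain ⟨popped, h1, h2, h3, h4, h5, h6, h7, h8, h9, h10, h11, h12, h13⟩ := h
  set B := (List.range k).foldl (bBndStep a)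
    ([], List.replicate a.length (-1 : Int), List.replicate a.length a.length) with hBdef
  set A := (a.take k).foldl aStep ([((-1 : Int), (0 : Int))], (0 : Int), (0 : Int)) with hAdef
  have hg : a.getD k 0 = a[k] := List.getD_eq_getElem a 0 hk
  have hAstep : (a.take (k + 1)).foldl aStep ([((-1 : Int), (0 : Int))], (0 : Int), (0 : Int))
      = aStep A (a.getD k 0) := by
    rw [List.take_add_one, List.getElem?_eq_getElem hk, ← hg]
    simp only [Option.toList_some, List.foldl_append, List.foldl_cons, List.foldl_nil, ← hAdef]
  have hBstep : (List.range (k + 1)).foldl (bBndStep a)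
      ([], List.replicate a.length (-1 : Int), List.replicate a.length a.length)
      = bBndStep a B k := by
    rw [List.range_succ]
    simp only [List.foldl_append, List.foldl_cons, List.foldl_nil, ← hBdef]
  obtain ⟨pp, heq, hsfx, hperm, hpplt, hdisj2, hrlen2⟩ :=
    popSim a hnneg k hk B.1 B.2.2 popped A.2.1 B.2.1 h5 h7 h8 h6 h4 h11 h3
  have hfst := congrArg Prod.fst heq
  have hsnd := congrArg Prod.snd heq
  simp only at hfst hsnd
  set st' := (bBndPop a k B.1 B.2.2).1 with hst'
  set rt' := (bBndPop a k B.1 B.2.2).2 with hrt'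
  have hst'lt : ∀ i ∈ st', i < k := fun i hi => h5 i (hsfx.subset hi)
  have hknst' : k ∉ st' := fun hin => absurd (hst'lt k hin) (lt_irrefl k)
  have hchain' : chainOK B.2.1 st' := by
    obtain ⟨t, ht⟩ := hsfx
    exact chainOK_append B.2.1 t st' (ht ▸ h4)
  refine ⟨pp, ?_, ?_, ?_, ?_, ?_, ?_, ?_, ?_, ?_, ?_, ?_, ?_, ?_⟩
  · -- stacks stay related
    rw [hAstep, hBstep]
    simp only [aStep, bBndStep, ← hst']
    rw [h1, h2, hfst]
    simp only [List.map_cons, List.cons_append, enc]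
    rw [preS_succ a k hk]
  · rw [hAstep]
    simp only [aStep]
    rw [h2, preS_succ a k hk]
  · -- ret stays the popped-products fold
    rw [hAstep, hBstep]
    simp only [aStep, bBndStep, ← hst', ← hrt']
    rw [h1, h2, hsnd]
    congr 1
    apply List.map_congr_left
    intro p hp
    exact (Pf_left_set a B.2.1 rt' k p (topI st') (by have := hpplt p hp; omega)).symm
  · -- chain invariant
    rw [hBstep]
    simp only [bBndStep, ← hst', ← hrt', chainOK]
    refine ⟨setD_self _ _ _ _ (by rw [h10]; exact hk), ?_⟩
    exact chainOK_set B.2.1 k (topI st') st' hknst' hchain'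
  · rw [hBstep]
    simp only [bBndStep, ← hst']
    intro i hi
    rcases List.mem_cons.mp hi with h | h
    · omega
    · have := hst'lt i h; omega
  · rw [hBstep]
    simp only [bBndStep, ← hst']
    exact List.nodup_cons.mpr ⟨hknst', hsfx.sublist.nodup h6⟩
  · intro i hi; have := hpplt i hi; omega
  · rw [hBstep]
    simp only [bBndStep, ← hst']
    intro i hi
    rcases List.mem_cons.mp hi with h | h
    · subst h; intro hin; exact absurd (hpplt i hin) (lt_irrefl i)
    · exact hdisj2 i h
  · rw [hBstep]
    simp only [bBndStep, ← hst']
    rw [List.range_succ]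
    refine (List.perm_middle).trans ?_
    refine ((hperm.trans h9).cons k).trans ?_
    exact (List.perm_append_singleton k (List.range k)).symm
  · rw [hBstep]
    simp only [bBndStep]
    rw [List.length_set]
    exact h10
  · rw [hBstep]
    simp only [bBndStep, ← hrt']
    exact hrlen2
  · rw [hBstep]
    simp only [bBndStep, ← hst']
    intro x hx
    rcases List.mem_or_eq_of_mem_set hx with h | h
    · exact h12 x h
    · subst h
      cases hst : st' with
      | nil => simp [topI]; omega
      | cons i' t =>
        have : i' < k := hst'lt i' (by rw [hst]; exact List.mem_cons_self ..)
        simp [topI]; omega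
  · rw [hBstep]
    simp only [bBndStep, ← hrt']
    intro x hx
    rcases bBndPop_right_mem a k B.1 B.2.2 x hx with h | h
    · exact h13 x h
    · omega

theorem invAB_all (a : List Int) (hnneg : ∀ x ∈ a, 0 ≤ x) : ∀ k, k ≤ a.length → InvAB a k := by
  intro k
  induction k with
  | zero => intro _; exact invAB_zero a
  | succ m ih => intro h; exact invAB_step a hnneg m (by omega) (ih (by omega))

-- with a 0 at the scanned position and nonnegative values, B's inner loop empties the stack
theorem bBndPop_all (a : List Int) (k : Nat) (h0 : a.getD k 0 = 0) (hnneg : ∀ x ∈ a, 0 ≤ x) :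
    ∀ (sB : List Nat) (right : List Nat), (∀ i ∈ sB, i < a.length) →
      (bBndPop a k sB right).1 = [] := by
  intro sB
  induction sB with
  | nil => intro right _; simp [bBndPop]
  | cons i rest ih =>
    intro right hlt
    have h1 : a.getD i 0 ≥ a.getD k 0 := by
      rw [h0]
      have : i < a.length := hlt i (by simp)
      have : a.getD i 0 ∈ a := by
        rw [List.getD_eq_getElem a 0 this]; exact List.getElem_mem this
      exact hnneg _ this
    simp only [bBndPop, if_pos h1]
    exact ih _ (fun j hj => hlt j (List.mem_cons_of_mem _ hj))

-- ===== VERDICT (by name: the statement is the Claim_ definition above) =====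
-- lookups in the prefix-sum list B builds are preS
theorem prefixs_getD (a : List Int) (m : Nat) (hm : m ≤ a.length) :
    (a.foldl (fun p x => p ++ [PySem.List.pyGetD p (-1) 0 + x]) [(0 : Int)]).getD m 0
      = preS a m := by
  rw [prefix_fold a [(0 : Int)] 0 (by decide)]
  have := accFrom_getD a 0 m hm
  simpa using this

theorem maximumSubarrayWithMinValue_spec : Claim_equal_maximumSubarrayWithMinValue := by
  intro nums _ hpre
  unfold Spec_maximumSubarrayWithMinValue maximumSubarrayWithMinValue maximumSubarrayWithMinValue_alt
  dsimp only
  set a := nums ++ [0] with ha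
  have hnneg : ∀ x ∈ a, 0 ≤ x := by
    intro x hx
    rcases List.mem_append.mp hx with h | h
    · exact hpre x h
    · simp at h; omega
  obtain ⟨m, hm⟩ : ∃ m, a.length = m + 1 := ⟨nums.length, by simp [ha]⟩
  have hmlt : m < a.length := by omega
  have hlast : a.getD m 0 = 0 := by
    rw [List.getD_eq_getElem a 0 hmlt]
    have hml : m = nums.length := by simp [ha] at hm; omega
    subst hml
    simp [ha]
  -- the invariant after all of a, with B's final stack being [m]
  have hInv := invAB_all a hnneg (m + 1) (by omega)
  simp only [InvAB] at hInv
  obtain ⟨popped, h1, h2, h3, h4, h5, h6, h7, h8, h9, h10, h11, h12, h13⟩ := hInv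
  set B := (List.range (m + 1)).foldl (bBndStep a)
    ([], List.replicate a.length (-1 : Int), List.replicate a.length a.length) with hBdef
  have hstack : B.1 = [m] := by
    obtain ⟨popped', g1, g2, g3, g4, g5, g6, g7, g8, g9, g10, g11, g12, g13⟩ :=
      (by simp only [InvAB] at *; exact invAB_all a hnneg m (by omega) : InvAB a m)
    rw [hBdef, List.range_succ]
    simp only [List.foldl_append, List.foldl_cons, List.foldl_nil, bBndStep]
    rw [bBndPop_all a m hlast hnneg _ _ (fun i hi => by have := g5 i hi; omega)]
  -- both returns are (ret mod p); show ret = best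
  congr 1
  -- A's fold runs over all of a
  have htake : a.take (m + 1) = a := by rw [← hm]; exact List.take_length
  rw [htake] at h3
  rw [show List.range a.length = List.range (m + 1) from by rw [hm], ← hBdef]
  rw [h3]
  -- B's final pass equals the same fold of products
  have hret0 : (0 : Int) ≤ (popped.map (Pf a B.2.1 B.2.2)).foldl max 0 :=
    (PySem.List.le_foldl_max _ 0).1
  have hcongr : (List.range (m + 1)).foldl (fun b i =>
        max b (a.getD i 0 *
          ((a.foldl (fun p x => p ++ [PySem.List.pyGetD p (-1) 0 + x]) [(0 : Int)]).getD (B.2.2.getD i 0) 0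
           - (a.foldl (fun p x => p ++ [PySem.List.pyGetD p (-1) 0 + x]) [(0 : Int)]).getD ((B.2.1.getD i (-1)) + 1).toNat 0))) 0
      = (List.range (m + 1)).foldl (fun b i => max b (Pf a B.2.1 B.2.2 i)) 0 := by
    apply PySem.List.foldl_congr_mem
    intro b i hi
    have hi' : i < m + 1 := List.mem_range.mp hi
    have hrmem : B.2.2.getD i 0 ∈ B.2.2 := by
      rw [List.getD_eq_getElem B.2.2 0 (by omega)]
      exact List.getElem_mem _
    have hlmem : B.2.1.getD i (-1) ∈ B.2.1 := by
      rw [List.getD_eq_getElem B.2.1 (-1) (by omega)]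
      exact List.getElem_mem _
    have hrb : B.2.2.getD i 0 ≤ a.length := h13 _ hrmem
    have hlb : ((B.2.1.getD i (-1)) + 1).toNat ≤ a.length := by
      have := h12 _ hlmem; omega
    rw [prefixs_getD a _ hrb, prefixs_getD a _ hlb]
    rfl
  have hmapfold : (List.range (m + 1)).foldl (fun b i => max b (Pf a B.2.1 B.2.2 i)) 0
      = ((List.range (m + 1)).map (Pf a B.2.1 B.2.2)).foldl max 0 :=
    List.foldl_map.symm
  rw [hcongr, hmapfold]
  have hperm2 : (List.range (m + 1)).Perm (popped ++ [m]) := (hstack ▸ h9).symm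
  rw [(hperm2.map (Pf a B.2.1 B.2.2)).foldl_eq'
      (fun x _ y _ z => max_right_comm z x y) 0]
  simp only [List.map_append, List.foldl_append, List.map_cons, List.map_nil,
    List.foldl_cons, List.foldl_nil]
  have hPm : Pf a B.2.1 B.2.2 m = 0 := by
    unfold Pf
    rw [hlast, zero_mul]
  rw [hPm]
  exact (max_eq_left hret0).symm
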